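-- pv_equiv track=rewrite | github.com/Dev-Muzzamil/Poly_LangID | polylang_detector.py | merge_adjacent_spans
-- ===== SOURCE A (Python) =====
-- def merge_adjacent_spans(pairs):
--     # Improved merging: avoid concatenating tokens, use space separation, and keep character offsets
--     merged = []
--     buffer = ""
--     prev_lang = None
--     for token, lang in pairs:
--         if lang == prev_lang:
--             if buffer:
--                 buffer += " " + token
--             else:
--                 buffer = token
--         else:
--             if buffer:
--                 merged.append((buffer.strip(), prev_lang))
--             buffer = token
--             prev_lang = lang
--     if buffer:
--         merged.append((buffer.strip(), prev_lang))
--     return merged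
-- ===== SOURCE B (Python) =====
-- def merge_adjacent_spans(pairs):
--     # Run-partitioning: scan out each maximal run of equal language label,
--     # join its tokens with spaces, drop runs whose tokens are all ''.
--     merged = []
--     i = 0
--     n = len(pairs)
--     while i < n:
--         lang = pairs[i][1]
--         j = i
--         while j < n and pairs[j][1] == lang:
--             j += 1
--         tokens = [tok for tok, _ in pairs[i:j]]
--         if any(tokens):
--             merged.append((" ".join(tokens).strip(), lang))
--         i = j
--     return merged
-- ===== Notes on version B (the rewrite author's own statement) =====
-- stated objective: alternative
-- what changed: Replaces A's incremental buffer/prev_lang accumulator with run-partitioning: scan out each maximal run of pairs sharing a language label, join the run's tokens with spaces and strip, dropping runs whose tokens are all empty strings.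
import Mathlib
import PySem

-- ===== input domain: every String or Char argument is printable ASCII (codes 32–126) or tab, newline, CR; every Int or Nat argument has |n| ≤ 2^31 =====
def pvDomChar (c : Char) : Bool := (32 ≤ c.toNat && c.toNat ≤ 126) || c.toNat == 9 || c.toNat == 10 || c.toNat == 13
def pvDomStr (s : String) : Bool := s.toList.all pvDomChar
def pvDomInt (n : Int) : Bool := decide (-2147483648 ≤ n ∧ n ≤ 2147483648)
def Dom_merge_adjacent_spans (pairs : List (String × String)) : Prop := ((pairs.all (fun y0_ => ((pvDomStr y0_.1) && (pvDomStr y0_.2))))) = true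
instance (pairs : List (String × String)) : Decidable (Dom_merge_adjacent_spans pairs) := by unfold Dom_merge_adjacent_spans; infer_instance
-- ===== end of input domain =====

-- B replaces A's incremental buffer/prev_lang accumulator with run-partitioning over
-- maximal equal-label runs (objective: alternative decomposition, same cost).

-- ===== PORT A =====
-- The buffer is kept as List Char (Python str concatenation is exact list append;
-- Lean's own String.append is opaque to the kernel, so we stay on toList).
-- State: (merged, buffer, prev_lang).  prev_lang : Option String (starts as None).
-- Note: a flush only happens with a nonempty buffer, and then prev_lang is always
-- `some _` (the '.getD ""' default is unreachable, it only discharges the Option).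
def pvStepA (st : List (String × String) × List Char × Option String)
    (p : String × String) : List (String × String) × List Char × Option String :=
  let (merged, buffer, prev) := st
  let (token, lang) := p
  if some lang = prev then
    if buffer ≠ [] then (merged, buffer ++ ' ' :: token.toList, prev)
    else (merged, token.toList, prev)
  else
    let merged' := if buffer ≠ [] then
        merged ++ [(String.ofList (PySem.Chars.strip buffer), prev.getD "")] else merged
    (merged', token.toList, some lang)

def merge_adjacent_spans (pairs : List (String × String)) : List (String × String) :=
  let st := pairs.foldl pvStepA ([], [], none)
  if st.2.1 ≠ [] then
    st.1 ++ [(String.ofList (PySem.Chars.strip st.2.1), st.2.2.getD "")]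
  else st.1

-- ===== PORT B =====
-- Source B's outer while loop scans out one maximal run of equal labels per iteration;
-- here each iteration is one recursive step (takeWhile/dropWhile = the inner scan).
def pvMergeRuns : List (String × String) → List (String × String)
  | [] => []
  | (t, l) :: rest =>
    let grp := rest.takeWhile (fun p => p.2 == l)
    let rest' := rest.dropWhile (fun p => p.2 == l)
    let toks := t :: grp.map Prod.fst
    (if toks.any (fun s => s ≠ "") then
       [(String.ofList (PySem.Chars.strip
           (PySem.Chars.join [' '] (toks.map String.toList))), l)]
     else []) ++ pvMergeRuns rest'
termination_by pairs => pairs.length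
decreasing_by
  simp only [List.length_cons]
  exact Nat.lt_succ_of_le (List.length_dropWhile_le _ _)

def merge_adjacent_spans_alt (pairs : List (String × String)) : List (String × String) :=
  pvMergeRuns pairs

-- ===== PRECONDITION & SPEC =====
def Spec_merge_adjacent_spans (pairs : List (String × String)) (out : List (String × String)) : Prop := out = merge_adjacent_spans_alt pairs
instance (pairs : List (String × String)) (out : List (String × String)) : Decidable (Spec_merge_adjacent_spans pairs out) := by unfold Spec_merge_adjacent_spans; infer_instance

-- ===== CLAIM (what is proved, stated in full; the proofs are below) =====
def Claim_equal_merge_adjacent_spans : Prop := ∀ (pairs : List (String × String)), Dom_merge_adjacent_spans pairs → Spec_merge_adjacent_spans pairs (merge_adjacent_spans pairs)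

-- ===== LEMMAS AND PROOFS =====

-- the buffer-accumulation step, on token character lists
def pvJb (b : List Char) (t : List Char) : List Char :=
  if b ≠ [] then b ++ ' ' :: t else t

def pvFlush (m : List (String × String)) (b : List Char) (pl : Option String) :
    List (String × String) :=
  if b ≠ [] then m ++ [(String.ofList (PySem.Chars.strip b), pl.getD "")] else m

def pvFinish (st : List (String × String) × List Char × Option String) :
    List (String × String) :=
  pvFlush st.1 st.2.1 st.2.2

lemma pvJb_nil (t : List Char) : pvJb [] t = t := by simp [pvJb]

lemma pvStepA_empty (m : List (String × String)) (pl : Option String) (t l : String) :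
    pvStepA (m, [], pl) (t, l) = (m, t.toList, some l) := by
  unfold pvStepA
  by_cases h : some l = pl
  · rw [← h]; simp
  · simp [h]

-- folding a same-label run only accumulates the buffer
lemma pvRun_fold (l : String) :
    ∀ (grp : List (String × String)), (∀ p ∈ grp, p.2 = l) →
    ∀ (rest : List (String × String)) (m : List (String × String)) (b : List Char),
    (grp ++ rest).foldl pvStepA (m, b, some l) =
      rest.foldl pvStepA (m, (grp.map (fun p => p.1.toList)).foldl pvJb b, some l) := by
  intro grp
  induction grp with
  | nil => intro _ rest m b; simp
  | cons p ps ih =>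
    intro h rest m b
    have hp : p.2 = l := h p (by simp)
    have hstep : pvStepA (m, b, some l) p = (m, pvJb b p.1.toList, some l) := by
      obtain ⟨t, l'⟩ := p
      simp only at hp
      subst hp
      unfold pvStepA pvJb
      by_cases hb : b = [] <;> simp [hb]
    simp only [List.cons_append, List.foldl_cons, hstep, List.map_cons]
    exact ih (fun q hq => h q (by simp [hq])) rest m (pvJb b p.1.toList)

lemma pvStrip_space_cons (u : List Char) :
    PySem.Chars.strip (' ' :: u) = PySem.Chars.strip u := by
  have h : PySem.Chars.isspace ' ' = true := by decide
  simp [PySem.Chars.strip, PySem.Chars.lstrip, h]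

-- once the buffer is nonempty, accumulation IS space-joining
lemma pvFold_jb_nonempty :
    ∀ (ts : List (List Char)) (b : List Char), b ≠ [] →
    ts.foldl pvJb b = PySem.Chars.join [' '] (b :: ts) := by
  intro ts
  induction ts with
  | nil => intro b _; simp [PySem.Chars.join_singleton]
  | cons x r ih =>
    intro b hb
    have hne : b ++ ' ' :: x ≠ [] := by simp
    simp only [List.foldl_cons]
    rw [show pvJb b x = b ++ ' ' :: x by simp [pvJb, hb]]
    rw [ih _ hne, PySem.Chars.join_cons_cons]
    cases r with
    | nil => simp [PySem.Chars.join_singleton]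
    | cons y s => simp [PySem.Chars.join_cons_cons]

lemma pvFold_jb_empty_iff :
    ∀ (ts : List (List Char)), (ts.foldl pvJb [] = [] ↔ ∀ x ∈ ts, x = []) := by
  intro ts
  induction ts with
  | nil => simp
  | cons x r ih =>
    simp only [List.foldl_cons, pvJb_nil]
    by_cases hx : x = []
    · subst hx; simpa using ih
    · constructor
      · intro h
        exact absurd (pvFold_jb_nonempty r x hx ▸ h)
          (by cases r with
              | nil => simpa [PySem.Chars.join_singleton] using hx
              | cons y s => simp [PySem.Chars.join_cons_cons, hx])
      · intro h; exact absurd (h x (by simp)) hx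
  
lemma pvFold_jb_strip :
    ∀ (ts : List (List Char)),
    PySem.Chars.strip (ts.foldl pvJb []) =
      PySem.Chars.strip (PySem.Chars.join [' '] ts) := by
  intro ts
  induction ts with
  | nil => simp [PySem.Chars.join_nil]
  | cons x r ih =>
    simp only [List.foldl_cons, pvJb_nil]
    by_cases hx : x = []
    · subst hx
      cases r with
      | nil => simp [PySem.Chars.join_singleton]
      | cons y s =>
        rw [PySem.Chars.join_cons_cons]
        simpa [pvStrip_space_cons] using ih
    · rw [pvFold_jb_nonempty r x hx]

lemma pvToks_any_iff (toks : List String) :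
    (toks.any (fun s => s ≠ "") = false) ↔
      (∀ x ∈ toks.map String.toList, x = []) := by
  simp only [List.any_eq_false, List.mem_map]
  constructor
  · rintro h x ⟨s, hs, rfl⟩
    have := h s hs
    simp only [decide_eq_true_eq] at this
    simp [not_not.mp this]
  · intro h s hs
    have h2 : s.toList = [] := h s.toList ⟨s, hs, rfl⟩
    simp [String.toList_eq_nil_iff.mp h2]

-- the main invariant: finishing A's fold started with an empty buffer emits m ++ B's runs
lemma pvMainAux :
    ∀ (n : Nat) (pairs : List (String × String)), pairs.length ≤ n →
    ∀ (m : List (String × String)) (pl : Option String),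
    pvFinish (pairs.foldl pvStepA (m, [], pl)) = m ++ pvMergeRuns pairs := by
  intro n
  induction n with
  | zero =>
    intro pairs hl m pl
    have hnil : pairs = [] := List.eq_nil_of_length_eq_zero (Nat.le_zero.mp hl)
    subst hnil
    simp [pvFinish, pvFlush, pvMergeRuns]
  | succ n ih =>
    intro pairs hl m pl
    match pairs with
    | [] => simp [pvFinish, pvFlush, pvMergeRuns]
    | (t, l) :: rest =>
      simp only [List.foldl_cons, pvStepA_empty]
      have hsplit : rest.takeWhile (fun p => p.2 == l) ++ rest.dropWhile (fun p => p.2 == l) = rest :=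
        List.takeWhile_append_dropWhile
      set grp := rest.takeWhile (fun p => p.2 == l) with hgrpdef
      set rest' := rest.dropWhile (fun p => p.2 == l) with hrestdef
      set toks := t :: grp.map Prod.fst with htoksdef
      have hgrp : ∀ p ∈ grp, p.2 = l := by
        intro p hp
        simpa using List.mem_takeWhile_imp hp
      have hrun := pvRun_fold l grp hgrp rest' m t.toList
      rw [hsplit] at hrun
      rw [hrun]
      set ACC : List Char := (grp.map (fun p => p.1.toList)).foldl pvJb t.toList with hACC
      have hACC0 : ACC = (toks.map String.toList).foldl pvJb [] := by
        rw [hACC, htoksdef]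
        simp only [List.map_cons, List.foldl_cons, pvJb_nil, List.map_map]
        rfl
      have hBdef : pvMergeRuns ((t, l) :: rest) =
          (if toks.any (fun s => s ≠ "") then
            [(String.ofList (PySem.Chars.strip
                (PySem.Chars.join [' '] (toks.map String.toList))), l)]
          else []) ++ pvMergeRuns rest' := by
        rw [pvMergeRuns]
      have hflush : pvFlush m ACC (some l) =
          m ++ (if toks.any (fun s => s ≠ "") then
            [(String.ofList (PySem.Chars.strip
                (PySem.Chars.join [' '] (toks.map String.toList))), l)] else []) := by
        unfold pvFlush
        by_cases hany : (toks.any (fun s => s ≠ "")) = true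
        · have hne : (toks.map String.toList).foldl pvJb [] ≠ [] := by
            intro h0
            have hall := (pvFold_jb_empty_iff (toks.map String.toList)).mp h0
            have h2 := (pvToks_any_iff toks).mpr hall
            rw [h2] at hany
            exact Bool.false_ne_true hany
          rw [hACC0, if_pos hne, if_pos hany, pvFold_jb_strip]
          simp
        · have hany' : (toks.any (fun s => s ≠ "")) = false :=
            Bool.eq_false_iff.mpr hany
          have hall : ∀ x ∈ toks.map String.toList, x = [] :=
            (pvToks_any_iff toks).mp hany'
          have hnil : ACC = [] := by rw [hACC0]; exact (pvFold_jb_empty_iff _).mpr hall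
          simp only [hnil, ne_eq, not_true_eq_false, if_false, hany',
            Bool.false_eq_true, List.append_nil]
      have hlen : rest'.length ≤ n := by
        have h1 : rest'.length ≤ rest.length :=
          List.length_dropWhile_le (fun p : String × String => p.2 == l) rest
        simp only [List.length_cons, Nat.succ_le_succ_iff] at hl
        omega
      cases hr : rest' with
      | nil =>
        simp only [List.foldl_nil]
        rw [hBdef, hr]
        simpa [pvFinish, pvMergeRuns] using hflush

      | cons q qs =>
        obtain ⟨t2, l2⟩ := q
        have hql : (l2 == l) = false := by
          have h3 : List.dropWhile (fun p : String × String => p.2 == l) rest = (t2, l2) :: qs := by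
            rw [← hrestdef]; exact hr
          have h4 := List.head?_dropWhile_not (fun p : String × String => p.2 == l) rest
          rw [h3] at h4
          simpa using h4
        have hne2 : some l2 ≠ some l := by
          simp only [ne_eq, Option.some_inj]
          intro h; rw [h] at hql; simp at hql
        have hstep : pvStepA (m, ACC, some l) (t2, l2) =
            (pvFlush m ACC (some l), t2.toList, some l2) := by
          unfold pvStepA pvFlush
          by_cases hb : ACC = [] <;> simp [hne2, hb]
        have hfold : List.foldl pvStepA (m, ACC, some l) ((t2, l2) :: qs)
            = List.foldl pvStepA (pvFlush m ACC (some l), [], none) ((t2, l2) :: qs) := by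
          simp only [List.foldl_cons, hstep, pvStepA_empty]
        rw [hfold, ih ((t2, l2) :: qs) (hr ▸ hlen) (pvFlush m ACC (some l)) none]
        rw [hBdef, hflush, hr, List.append_assoc]

-- ===== VERDICT (by name: the statement is the Claim_ definition above) =====
theorem merge_adjacent_spans_spec : Claim_equal_merge_adjacent_spans := by
  intro pairs _
  unfold Spec_merge_adjacent_spans merge_adjacent_spans merge_adjacent_spans_alt
  have h := pvMainAux pairs.length pairs le_rfl [] none
  simp only [List.nil_append] at h
  rw [← h]
  rfl
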